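-- pv_equiv track=rewrite | github.com/Sukhdevkaushik/PythonCode | course/Array_programs/Majority_Element_II.py | majority_element_2_batter
-- ===== SOURCE A (Python) =====
-- def majority_element_2_batter(arr):
--     result = {}
--     data = []
--     for value in arr:
--         if value in result:
--             result[value] += 1
--         else:
--             result[value] = 1
--     for key, value in result.items():
--         if value >= 3:
--             data.append(key)
--     return data
-- ===== SOURCE B (Python) =====
-- def majority_element_2_batter(arr):
--     seen = set()
--     out = []
--     for value in arr:
--         if value not in seen:
--             seen.add(value)
--             if arr.count(value) >= 3:
--                 out.append(value)
--     return out
-- ===== Notes on version B (the rewrite author's own statement) =====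
-- stated objective: simpler
-- what changed: Replaces the frequency dictionary plus second pass over its items by a single pass over arr with a seen-set, calling arr.count on each first occurrence.
import Mathlib
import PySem

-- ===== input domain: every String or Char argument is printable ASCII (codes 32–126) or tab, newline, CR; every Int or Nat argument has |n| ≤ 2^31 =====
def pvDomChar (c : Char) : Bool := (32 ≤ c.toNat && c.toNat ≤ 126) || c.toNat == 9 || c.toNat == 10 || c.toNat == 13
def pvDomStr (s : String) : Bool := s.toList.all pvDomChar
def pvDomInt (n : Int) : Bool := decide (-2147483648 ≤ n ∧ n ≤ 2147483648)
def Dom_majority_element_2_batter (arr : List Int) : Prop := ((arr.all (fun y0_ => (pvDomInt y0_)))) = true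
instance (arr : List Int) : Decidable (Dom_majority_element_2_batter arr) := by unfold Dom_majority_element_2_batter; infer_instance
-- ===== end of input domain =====

-- B replaces A's frequency dictionary + second pass over its items by one pass over arr with a seen-set and arr.count; objective: simpler.


-- ===== PORT A =====
def majority_element_2_batter (arr : List Int) : List Int :=
  let result : PySem.Dict Int Int :=
    arr.foldl (fun d value =>
      if d.contains value then d.insert value (d.getD value 0 + 1)
      else d.insert value 1) PySem.Dict.empty
  result.items.foldl (fun data p => if p.2 ≥ 3 then data ++ [p.1] else data) []

-- ===== PORT B =====
def mebGo (arr : List Int) : List Int → PySem.Set Int → List Int → List Int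
  | [], _, out => out
  | value :: rest, seen, out =>
    if PySem.Set.contains seen value then mebGo arr rest seen out
    else mebGo arr rest (PySem.Set.add seen value)
        (if (PySem.List.count arr value : Int) ≥ 3 then out ++ [value] else out)

def majority_element_2_batter_alt (arr : List Int) : List Int :=
  mebGo arr arr PySem.Set.empty []

-- ===== PRECONDITION & SPEC =====
def Spec_majority_element_2_batter (arr : List Int) (out : List Int) : Prop := out = majority_element_2_batter_alt arr
instance (arr : List Int) (out : List Int) : Decidable (Spec_majority_element_2_batter arr out) := by unfold Spec_majority_element_2_batter; infer_instance

-- ===== CLAIM (what is proved, stated in full; the proofs are below) =====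
def Claim_equal_majority_element_2_batter : Prop := ∀ (arr : List Int), Dom_majority_element_2_batter arr → Spec_majority_element_2_batter arr (majority_element_2_batter arr)

-- ===== LEMMAS AND PROOFS =====

-- A's counting loop step is exactly Dict.modify value 0 (· + 1)
lemma meb_step_eq_modify (d : PySem.Dict Int Int) (v : Int) :
    (if d.contains v then d.insert v (d.getD v 0 + 1) else d.insert v 1) =
      d.modify v 0 (· + 1) := by
  by_cases h : d.contains v = true
  · simp [PySem.Dict.modify, h]
  · simp only [Bool.not_eq_true] at h
    simp [PySem.Dict.modify, h, PySem.Dict.getD_of_not_contains d 0 h]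

-- hence A's counting loop builds Counter(arr)
lemma meb_counter (l : List Int) (d : PySem.Dict Int Int) :
    l.foldl (fun d value =>
      if d.contains value then d.insert value (d.getD value 0 + 1)
      else d.insert value 1) d = l.foldl (fun d x => d.modify x 0 (· + 1)) d := by
  simp only [meb_step_eq_modify]

-- B's loop: the output is out ++ the newly-seen elements, filtered by count ≥ 3
lemma mebGo_spec (arr : List Int) (rest : List Int) :
    ∀ (seen : PySem.Set Int) (out : List Int),
      mebGo arr rest seen out =
        out ++ ((PySem.Set.update seen rest).drop seen.length).filter
          (fun k => decide ((PySem.List.count arr k : Int) ≥ 3)) := by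
  induction rest with
  | nil => intro seen out; simp [mebGo, PySem.Set.update_nil]
  | cons v rest ih =>
    intro seen out
    by_cases hv : v ∈ seen
    · have hc : PySem.Set.contains seen v = true := (PySem.Set.contains_iff seen v).mpr hv
      rw [mebGo, if_pos hc, ih, PySem.Set.update_cons, PySem.Set.add_of_mem hv]
    · have hc : ¬ (PySem.Set.contains seen v = true) := fun h => hv ((PySem.Set.contains_iff seen v).mp h)
      rw [mebGo, if_neg hc, ih, PySem.Set.update_cons, PySem.Set.add_of_not_mem hv,
        PySem.Set.update_eq_append_filter]
      rw [List.append_assoc, List.drop_left]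
      have h2 : ((seen ++ [v]) ++
          (PySem.Set.ofList rest).filter (fun y => !(PySem.Set.contains (seen ++ [v]) y))).drop
            (seen ++ [v]).length =
          (PySem.Set.ofList rest).filter (fun y => !(PySem.Set.contains (seen ++ [v]) y)) :=
        List.drop_left
      rw [List.append_assoc] at h2
      rw [h2]
      by_cases hp : 3 ≤ List.count v arr <;>
        simp [PySem.List.count_eq, hp]

-- ===== VERDICT (by name: the statement is the Claim_ definition above) =====
theorem majority_element_2_batter_spec : Claim_equal_majority_element_2_batter := by
  intro arr _
  show majority_element_2_batter arr = majority_element_2_batter_alt arr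
  rw [majority_element_2_batter_alt, mebGo_spec, PySem.Set.update_empty]
  show majority_element_2_batter arr =
    [] ++ ((PySem.Set.ofList arr).drop 0).filter (fun k => decide ((PySem.List.count arr k : Int) ≥ 3))
  rw [majority_element_2_batter]
  rw [meb_counter, ← PySem.Dict.counter_eq_foldl]
  simp only [PySem.Dict.items_counter, List.foldl_map, List.nil_append, List.drop_zero]
  rw [PySem.List.foldl_append_ite_eq_filter (fun k => ((List.count k arr : Int) ≥ 3)) _ []]
  simp [PySem.List.count_eq]
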